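-- pv_equiv track=rewrite | github.com/htw229/hazelsworks | app/htmlutils.py | linebreakstoparagraphs
-- ===== SOURCE A (Python) =====
-- def linebreakstoparagraphs(inputtext):
--
--     paragraphs = [w for w in inputtext.split('\r\n')]
--
--     # if double carriage returns, create blank paragraph
--     blanklines = 0
--     for i, p in enumerate(paragraphs):
--         if not p and blanklines > 2:
--             paragraphs[i] = '&nbsp;'
--             blanklines = 0
--         elif not p:
--             blanklines += 1
--         else:
--             blanklines = 0
--     paragraphs = [p for p in paragraphs if p]
--
--     html = r'<p>' + r'</p><p>'.join(paragraphs) + r'</p>'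
--     return html
-- ===== SOURCE B (Python) =====
-- def linebreakstoparagraphs(inputtext):
--     lines = inputtext.split('\r\n')
--     out = []
--     i = 0
--     n = len(lines)
--     while i < n:
--         if lines[i]:
--             out.append(lines[i])
--             i += 1
--         else:
--             j = i
--             while j < n and not lines[j]:
--                 j += 1
--             out.extend(['&nbsp;'] * ((j - i) // 4))
--             i = j
--     return '<p>' + '</p><p>'.join(out) + '</p>'
-- ===== Notes on version B (the rewrite author's own statement) =====
-- stated objective: alternative
-- what changed: B replaces A's in-place counter-mutating pass plus a separate filter pass by a single run-grouping scan: maximal runs of blank lines are measured at once and emit floor(k/4) '&nbsp;' paragraphs, non-blank lines are emitted verbatim.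
import Mathlib
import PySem

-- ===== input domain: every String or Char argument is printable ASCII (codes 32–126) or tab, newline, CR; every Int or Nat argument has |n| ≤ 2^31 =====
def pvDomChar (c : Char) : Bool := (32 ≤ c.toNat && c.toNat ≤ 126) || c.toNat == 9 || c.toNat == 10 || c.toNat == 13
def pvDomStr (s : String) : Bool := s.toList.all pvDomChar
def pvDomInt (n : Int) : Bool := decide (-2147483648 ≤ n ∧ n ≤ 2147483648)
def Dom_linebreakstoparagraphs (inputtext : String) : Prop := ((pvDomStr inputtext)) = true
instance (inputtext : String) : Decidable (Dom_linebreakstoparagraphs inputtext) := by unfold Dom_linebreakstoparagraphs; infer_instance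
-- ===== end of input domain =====

-- B replaces A's in-place counter pass + filter pass by one run-grouping scan (objective: alternative).

-- ===== PORT A =====
-- the for-loop over enumerate(paragraphs) with the running 'blanklines' counter, rewriting
-- every 4th consecutive blank to '&nbsp;' (the list mutation is ported as rebuilding the list)
def pvFixA : List String → Nat → List String
  | [], _ => []
  | p :: rest, b =>
    if p = "" ∧ b > 2 then "&nbsp;" :: pvFixA rest 0
    else if p = "" then p :: pvFixA rest (b + 1)
    else p :: pvFixA rest 0

def linebreakstoparagraphs (inputtext : String) : String :=
  let paragraphs := (PySem.Chars.splitOn inputtext.toList "\r\n".toList).map String.ofList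
  let paragraphs := pvFixA paragraphs 0
  let paragraphs := paragraphs.filter (fun p => p ≠ "")
  "<p>" ++ PySem.Str.join "</p><p>" paragraphs ++ "</p>"

-- ===== PORT B =====
-- the inner while-loop of Source B: length of the leading blank run and the remainder
def pvTakeBlanks : List String → Nat × List String
  | [] => (0, [])
  | p :: rest =>
    if p = "" then
      let kr := pvTakeBlanks rest
      (kr.1 + 1, kr.2)
    else (0, p :: rest)

theorem pvTakeBlanks_len (l : List String) : (pvTakeBlanks l).2.length ≤ l.length := by
  induction l with
  | nil => simp [pvTakeBlanks]
  | cons p rest ih =>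
    by_cases h : p = "" <;> simp [pvTakeBlanks, h] <;> omega

-- the outer while-loop of Source B: emit non-blank lines, emit (run length)//4 '&nbsp;' per blank run
def pvEmit : List String → List String
  | [] => []
  | p :: rest =>
    if p = "" then
      let kr := pvTakeBlanks rest
      List.replicate ((kr.1 + 1) / 4) "&nbsp;" ++ pvEmit kr.2
    else p :: pvEmit rest
termination_by l => l.length
decreasing_by
  · exact Nat.lt_succ_of_le (pvTakeBlanks_len rest)
  · simp

def linebreakstoparagraphs_alt (inputtext : String) : String :=
  let lines := (PySem.Chars.splitOn inputtext.toList "\r\n".toList).map String.ofList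
  "<p>" ++ PySem.Str.join "</p><p>" (pvEmit lines) ++ "</p>"

-- ===== PRECONDITION & SPEC =====
def Spec_linebreakstoparagraphs (inputtext : String) (out : String) : Prop := out = linebreakstoparagraphs_alt inputtext
instance (inputtext : String) (out : String) : Decidable (Spec_linebreakstoparagraphs inputtext out) := by unfold Spec_linebreakstoparagraphs; infer_instance

-- ===== CLAIM (what is proved, stated in full; the proofs are below) =====
def Claim_equal_linebreakstoparagraphs : Prop := ∀ (inputtext : String), Dom_linebreakstoparagraphs inputtext → Spec_linebreakstoparagraphs inputtext (linebreakstoparagraphs inputtext)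

-- ===== LEMMAS AND PROOFS =====

-- A's pass fused with the subsequent filter (proof-only helper)
def pvEmitB : List String → Nat → List String
  | [], _ => []
  | p :: rest, b =>
    if p = "" then (if b > 2 then "&nbsp;" :: pvEmitB rest 0 else pvEmitB rest (b + 1))
    else p :: pvEmitB rest 0

theorem filter_pvFixA (l : List String) (b : Nat) :
    (pvFixA l b).filter (fun p => p ≠ "") = pvEmitB l b := by
  induction l generalizing b with
  | nil => simp [pvFixA, pvEmitB]
  | cons p rest ih =>
    simp only [ne_eq, decide_not] at ih
    by_cases hp : p = ""
    · by_cases hb : b > 2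
      · simp [pvFixA, pvEmitB, hp, hb, ih]
      · simp [pvFixA, pvEmitB, hp, hb, ih]
    · simp [pvFixA, pvEmitB, hp, ih]

theorem pvEmit_run (l : List String) :
    pvEmit l = List.replicate ((pvTakeBlanks l).1 / 4) "&nbsp;" ++ pvEmit (pvTakeBlanks l).2 := by
  cases l with
  | nil => simp [pvEmit, pvTakeBlanks]
  | cons p rest =>
    by_cases hp : p = ""
    · simp [pvEmit, pvTakeBlanks, hp]
    · simp [pvEmit, pvTakeBlanks, hp]

theorem pvEmitB_run (l : List String) (b : Nat) (hb : b ≤ 3) :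
    pvEmitB l b =
      List.replicate (((pvTakeBlanks l).1 + b) / 4) "&nbsp;" ++ pvEmit (pvTakeBlanks l).2 := by
  induction l generalizing b with
  | nil => simp [pvEmitB, pvTakeBlanks, pvEmit, Nat.div_eq_of_lt (by omega : b < 4)]
  | cons p rest ih =>
    by_cases hp : p = ""
    · by_cases hbb : b > 2
      · have hb3 : b = 3 := by omega
        simp only [pvEmitB, hp, if_pos rfl, if_pos hbb, pvTakeBlanks, ih 0 (by omega), hb3]
        have h4 : ((pvTakeBlanks rest).1 + 1 + 3) / 4 = ((pvTakeBlanks rest).1 + 0) / 4 + 1 := by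
          omega
        simp [h4, List.replicate_succ]
      · simp only [pvEmitB, hp, if_pos rfl, if_neg hbb, pvTakeBlanks, ih (b + 1) (by omega)]
        have h4 : (pvTakeBlanks rest).1 + 1 + b = (pvTakeBlanks rest).1 + (b + 1) := by omega
        simp [h4]
    · simp only [pvEmitB, if_neg hp, pvTakeBlanks]
      rw [ih 0 (by omega), Nat.add_zero, ← pvEmit_run]
      simp [hp, pvEmit, Nat.div_eq_of_lt (by omega : b < 4)]

theorem pvEmitB_zero (l : List String) : pvEmitB l 0 = pvEmit l := by
  rw [pvEmitB_run l 0 (by omega), Nat.add_zero, ← pvEmit_run]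

-- ===== VERDICT (by name: the statement is the Claim_ definition above) =====
theorem linebreakstoparagraphs_spec : Claim_equal_linebreakstoparagraphs := by
  intro inputtext _
  unfold Spec_linebreakstoparagraphs linebreakstoparagraphs linebreakstoparagraphs_alt
  simp only [filter_pvFixA, pvEmitB_zero]
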